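-- pv_equiv track=rewrite | github.com/vahidrn98/leetcode | incrementToTarget.py | counti
-- ===== SOURCE A (Python) =====
-- def counti(A):
--   c = 0
--   inInterval = False
--   length = len(A)
--   for i in range(length):
--     if (A[i]==0 and i>0 and inInterval) or (i==length-1 and A[i]>0) :
--       c+=1
--       inInterval = False
--     elif(A[i]>0):
--       inInterval = True
--
--   return c
-- ===== SOURCE B (Python) =====
-- def counti(A):
--     # Split A into segments separated by zeros, then count closed segments
--     # containing a positive, plus one open trailing interval if A ends positive.
--     segs = []
--     cur = []
--     for x in A:
--         if x == 0:
--             segs.append(cur)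
--             cur = []
--         else:
--             cur.append(x)
--     closed = sum(1 for s in segs if any(v > 0 for v in s))
--     return closed + (1 if A and A[-1] > 0 else 0)
-- ===== Notes on version B (the rewrite author's own statement) =====
-- stated objective: alternative
-- what changed: Replaces A's index-based state-machine loop (inInterval flag plus i==len-1 test inside the loop) by a split-at-zeros segment pass: build the zero-separated segments, count closed segments containing a positive, then add 1 iff the last element is positive.
import Mathlib
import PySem

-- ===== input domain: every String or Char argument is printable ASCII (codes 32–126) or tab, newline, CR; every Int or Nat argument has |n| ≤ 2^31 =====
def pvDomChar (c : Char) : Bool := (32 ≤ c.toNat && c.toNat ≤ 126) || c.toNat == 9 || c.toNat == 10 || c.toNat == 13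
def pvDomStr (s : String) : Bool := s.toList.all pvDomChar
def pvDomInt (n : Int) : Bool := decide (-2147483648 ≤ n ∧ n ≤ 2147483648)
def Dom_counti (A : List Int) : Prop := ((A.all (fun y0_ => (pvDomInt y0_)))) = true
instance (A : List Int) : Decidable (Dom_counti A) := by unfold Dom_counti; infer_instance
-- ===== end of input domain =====

-- B replaces A's index-based flag state machine by a split-at-zeros segment pass
-- plus a trailing-element guard (objective: alternative decomposition, same cost).

-- ===== PORT A =====
def counti (A : List Int) : Int :=
  let length : Int := A.length
  ((PySem.List.pyRange 0 length 1).foldl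
      (fun (s : Int × Bool) (i : Int) =>
        if ((PySem.List.pyGetD A i 0 == 0 && decide (0 < i) && s.2)
            || (i == length - 1 && decide (0 < PySem.List.pyGetD A i 0))) then
          (s.1 + 1, false)
        else if decide (0 < PySem.List.pyGetD A i 0) then (s.1, true)
        else s)
      (0, false)).1

-- ===== PORT B =====
-- B-side helpers (named pieces of Source B's loop body and comprehension)
def bStep (s : List (List Int) × List Int) (x : Int) : List (List Int) × List Int :=
  if x == 0 then (s.1 ++ [s.2], []) else (s.1, s.2 ++ [x])

def bHasPos (seg : List Int) : Bool := seg.any (fun v => decide (0 < v))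

def counti_alt (A : List Int) : Int :=
  let p := A.foldl bStep ([], [])
  let closed : Int := ((p.1.filter bHasPos).length : Int)
  closed + (match PySem.List.pyGet? A (-1) with
            | some v => if 0 < v then 1 else 0
            | none => 0)

-- ===== PRECONDITION & SPEC =====
def Spec_counti (A : List Int) (out : Int) : Prop := out = counti_alt A
instance (A : List Int) (out : Int) : Decidable (Spec_counti A out) := by unfold Spec_counti; infer_instance

-- ===== CLAIM (what is proved, stated in full; the proofs are below) =====
def Claim_equal_counti : Prop := ∀ (A : List Int), Dom_counti A → Spec_counti A (counti A)

-- ===== LEMMAS AND PROOFS =====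

-- zeros that close a positive-containing run (b: "a positive was seen since the last zero")
def clos : List Int → Bool → Int
  | [], _ => 0
  | x :: xs, b => if x = 0 then (if b then 1 else 0) + clos xs false else clos xs (b || decide (0 < x))

-- 1 iff the last element is positive
def lastpos : List Int → Int
  | [] => 0
  | [x] => if 0 < x then 1 else 0
  | _ :: y :: t => lastpos (y :: t)

-- A's loop body as a function of (index, element)
def stepA (len : Int) (s : Int × Bool) (p : Int × Int) : Int × Bool :=
  if ((p.2 == 0 && decide (0 < p.1) && s.2) || (p.1 == len - 1 && decide (0 < p.2))) then
    (s.1 + 1, false)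
  else if decide (0 < p.2) then (s.1, true)
  else s

theorem lemA : ∀ (xs : List Int) (len s c : Int) (b : Bool),
    0 ≤ s → len = s + xs.length → (s = 0 → b = false) →
    ((PySem.List.enumerate xs s).foldl (stepA len) (c, b)).1 = c + clos xs b + lastpos xs := by
  intro xs
  induction xs with
  | nil => intro len s c b _ _ _; simp [PySem.List.enumerate, clos, lastpos]
  | cons x t ih =>
    intro len s c b hs hlen hb
    rw [PySem.List.enumerate_cons]
    simp only [List.foldl_cons]
    cases t with
    | nil =>
      simp only [PySem.List.enumerate_nil, List.foldl_nil]
      have hlen' : len = s + 1 := by simpa using hlen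
      by_cases hx0 : x = 0
      · subst hx0
        by_cases hsp : 0 < s
        · by_cases hbt : b = true
          · subst hbt
            simp [stepA, hsp, clos, lastpos]
          · have : b = false := by cases b <;> simp_all
            subst this
            simp [stepA, clos, lastpos]
        · have hs0 : s = 0 := by omega
          have : b = false := hb hs0
          subst this
          simp [stepA, hsp, clos, lastpos]
      · by_cases hxp : 0 < x
        · have : (x == (0:Int)) = false := by simp [hx0]
          simp [stepA, hlen', hxp, clos, lastpos, hx0]
        · simp [stepA, hx0, hxp, clos, lastpos, hlen']
    | cons y u =>
      have hlast : (s == len - 1) = false := by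
        simp only [beq_eq_false_iff_ne, ne_eq]
        simp only [List.length_cons] at hlen
        push_cast at hlen
        omega
      by_cases hx0 : x = 0
      · subst hx0
        by_cases hc : 0 < s ∧ b = true
        · have : stepA len (c, b) (s, 0) = (c + 1, false) := by
            simp [stepA, hc.1, hc.2]
          rw [this, ih len (s+1) (c+1) false (by omega) (by simp at hlen ⊢; omega) (by omega)]
          simp [clos, lastpos, hc.2]
          omega
        · have hbf : b = false := by
            rcases Classical.em (0 < s) with h | h
            · cases b with
              | false => rfl
              | true => exact absurd ⟨h, rfl⟩ hc
            · exact hb (by omega)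
          subst hbf
          have : stepA len (c, false) (s, 0) = (c, false) := by simp [stepA, hlast]
          rw [this, ih len (s+1) c false (by omega) (by simp at hlen ⊢; omega) (by omega)]
          simp [clos, lastpos]
      · by_cases hxp : 0 < x
        · have : stepA len (c, b) (s, x) = (c, true) := by
            simp [stepA, hx0, hxp, hlast]
          rw [this, ih len (s+1) c true (by omega) (by simp at hlen ⊢; omega) (by omega)]
          simp [clos, lastpos, hx0, hxp]
        · have : stepA len (c, b) (s, x) = (c, b) := by
            simp [stepA, hx0, hxp, hlast]
          rw [this, ih len (s+1) c b (by omega) (by simp at hlen ⊢; omega) (by omega)]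
          simp [clos, lastpos, hx0, hxp]

theorem countiA_eq (A : List Int) : counti A = clos A false + lastpos A := by
  have hmap := PySem.List.enumerate_eq_map_pyRange A (0:Int)
  have h : counti A = ((PySem.List.enumerate A 0).foldl (stepA (A.length : Int)) ((0:Int), false)).1 := by
    rw [hmap, List.foldl_map]
    rfl
  rw [h]
  simpa using lemA A (A.length : Int) 0 0 false le_rfl (by simp) (fun _ => rfl)

theorem lemB : ∀ (xs : List Int) (segs : List (List Int)) (cur : List Int),
    (((xs.foldl bStep (segs, cur)).1.filter bHasPos).length : Int)
      = ((segs.filter bHasPos).length : Int) + clos xs (bHasPos cur) := by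
  intro xs
  induction xs with
  | nil => intro segs cur; simp [clos]
  | cons x t ih =>
    intro segs cur
    by_cases hx0 : x = 0
    · subst hx0
      have hstep : bStep (segs, cur) 0 = (segs ++ [cur], []) := by simp [bStep]
      rw [List.foldl_cons, hstep, ih]
      have hf : ((List.filter bHasPos (segs ++ [cur])).length : Int)
          = ((List.filter bHasPos segs).length : Int) + (if bHasPos cur = true then 1 else 0) := by
        rw [List.filter_append, List.length_append]
        by_cases hp : bHasPos cur = true <;> simp [hp]
      rw [hf]
      have hc : clos (0 :: t) (bHasPos cur) = (if bHasPos cur = true then (1:Int) else 0) + clos t false := by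
        simp [clos]
      rw [hc]
      have hnil : bHasPos ([] : List Int) = false := rfl
      rw [hnil]
      ring
    · have hstep : bStep (segs, cur) x = (segs, cur ++ [x]) := by simp [bStep, hx0]
      rw [List.foldl_cons, hstep, ih]
      simp [clos, hx0, bHasPos, List.any_append]

theorem lastpos_eq (A : List Int) :
    (match PySem.List.pyGet? A (-1) with
     | some v => if 0 < v then (1:Int) else 0
     | none => 0) = lastpos A := by
  rw [PySem.List.pyGet?_neg_one]
  induction A with
  | nil => rfl
  | cons x t ih =>
    cases t with
    | nil => simp [lastpos]
    | cons y u =>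
      rw [List.getLast?_cons_cons]
      simpa [lastpos] using ih

theorem countiB_eq (A : List Int) : counti_alt A = clos A false + lastpos A := by
  unfold counti_alt
  have h1 := lemB A [] []
  simp only [List.filter_nil, List.length_nil] at h1
  have h2 := lastpos_eq A
  simp only []
  rw [h1, h2]
  simp [bHasPos]

-- ===== VERDICT (by name: the statement is the Claim_ definition above) =====
theorem counti_spec : Claim_equal_counti := by
  intro A _
  unfold Spec_counti
  rw [countiA_eq, countiB_eq]
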